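-- pv_equiv track=rewrite | github.com/miguelmorin/FlaskChess | flask_app.py | mainline_to_html_pgn
-- ===== SOURCE A (Python) =====
-- def mainline_to_html_pgn(mainline):
--     output = []
--     for i, line in enumerate(mainline):
--         if 0 < i and 0 == i % 2:
--             output.append("<br/>")
--         else:
--             output.append(" ")
--         output.append(line)
--
--     return "".join(output)
-- ===== SOURCE B (Python) =====
-- def mainline_to_html_pgn(mainline):
--     moves = list(mainline)
--     if not moves:
--         return ""
--     rows = []
--     j = 0
--     while j < len(moves):
--         rows.append(" ".join(moves[j:j+2]))
--         j += 2
--     return " " + "<br/>".join(rows)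
-- ===== Notes on version B (the rewrite author's own statement) =====
-- stated objective: alternative
-- what changed: B materialises the input and consumes it two moves (one display row) at a time, joining each pair with ' ' and the rows with '<br/>' plus one leading space, instead of A's per-element enumerate loop that tests index parity to pick a separator.
import Mathlib
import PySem

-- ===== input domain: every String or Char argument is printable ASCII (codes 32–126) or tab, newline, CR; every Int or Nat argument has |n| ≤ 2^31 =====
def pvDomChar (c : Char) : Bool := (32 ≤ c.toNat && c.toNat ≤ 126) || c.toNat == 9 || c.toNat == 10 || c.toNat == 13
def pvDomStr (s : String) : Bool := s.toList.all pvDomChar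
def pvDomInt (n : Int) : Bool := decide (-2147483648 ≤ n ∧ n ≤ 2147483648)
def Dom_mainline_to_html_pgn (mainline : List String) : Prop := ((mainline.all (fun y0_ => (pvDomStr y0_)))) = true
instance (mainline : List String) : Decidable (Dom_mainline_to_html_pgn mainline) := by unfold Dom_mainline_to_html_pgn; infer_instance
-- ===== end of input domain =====

-- B builds the output one display row (two moves) at a time instead of testing index parity per element; objective: alternative decomposition, same cost.

-- ===== PORT A =====
def mainline_to_html_pgn (mainline : List String) : String :=
  let output : List String :=
    (PySem.List.enumerate mainline 0).foldl
      (fun acc p =>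
        let acc := if (0 : Int) < p.1 ∧ (0 : Int) = p.1 % 2 then acc ++ ["<br/>"] else acc ++ [" "]
        acc ++ [p.2])
      []
  PySem.Str.join "" output

-- ===== PORT B =====
-- the while loop of Source B: one row (moves[j:j+2]) per iteration, j advancing by 2
def pvRows (moves : List String) (j : Int) : List String :=
  if j < (moves.length : Int) then
    PySem.Str.join " " (PySem.List.slice moves (some j) (some (j + 2))) ::
      pvRows moves (j + 2)
  else []
termination_by ((moves.length : Int) - j).toNat
decreasing_by omega

def mainline_to_html_pgn_alt (mainline : List String) : String :=
  let moves := mainline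
  if moves = [] then ""
  else " " ++ PySem.Str.join "<br/>" (pvRows moves 0)

-- ===== PRECONDITION & SPEC =====
def Spec_mainline_to_html_pgn (mainline : List String) (out : String) : Prop := out = mainline_to_html_pgn_alt mainline
instance (mainline : List String) (out : String) : Decidable (Spec_mainline_to_html_pgn mainline out) := by unfold Spec_mainline_to_html_pgn; infer_instance

-- ===== CLAIM (what is proved, stated in full; the proofs are below) =====
def Claim_equal_mainline_to_html_pgn : Prop := ∀ (mainline : List String), Dom_mainline_to_html_pgn mainline → Spec_mainline_to_html_pgn mainline (mainline_to_html_pgn mainline)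

-- ===== LEMMAS AND PROOFS =====

-- the separator A emits before the move at index i
def pvSep (i : Int) : List String := if 0 < i ∧ 0 = i % 2 then ["<br/>"] else [" "]

-- proof-side view of B's row loop: consume the remaining moves two at a time
def pvRowsL (moves : List String) : List String :=
  if moves = [] then []
  else
    PySem.Str.join " " (PySem.List.slice moves none (some 2)) ::
      pvRowsL (PySem.List.slice moves (some 2) none)
termination_by moves.length
decreasing_by
  rcases moves with _ | ⟨x, xs⟩
  · simp_all
  · rw [PySem.List.slice_from]
    simp
    omega

-- the indexed loop equals the structural one on the not-yet-consumed suffix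
theorem pvRows_eq (moves : List String) (j : Nat) :
    pvRows moves (j : Int) = pvRowsL (moves.drop j) := by
  by_cases h : j < moves.length
  · rw [pvRows, if_pos (by exact_mod_cast h)]
    rw [pvRowsL, if_neg (by simp; omega)]
    have h2 : ((j : Int) + 2) = ((j + 2 : Nat) : Int) := by push_cast; ring
    rw [h2, pvRows_eq moves (j + 2)]
    have h3 : PySem.List.slice moves (some (j : Int)) (some ((j + 2 : Nat) : Int))
        = (moves.drop j).take 2 := by
      push_cast
      exact PySem.List.slice_natCast_add moves j 2
    rw [h3]
    rw [PySem.List.slice_to (moves.drop j) (by norm_num : (0:Int) ≤ 2),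
      PySem.List.slice_from (moves.drop j) (by norm_num : (0:Int) ≤ 2)]
    simp [List.drop_drop]
  · rw [pvRows, if_neg (by omega), pvRowsL, if_pos (by simp; omega)]
termination_by moves.length - j
decreasing_by omega

theorem pvJoinEmpty (parts : List (List Char)) : PySem.Chars.join [] parts = parts.flatten := by
  induction parts with
  | nil => simp [PySem.Chars.join_nil]
  | cons p rest ih =>
    cases rest with
    | nil => simp [PySem.Chars.join_singleton]
    | cons q r => simp [PySem.Chars.join_cons_cons, ih]

-- A's fold is a flatMap of separator-plus-move pairs
theorem pvA_eq (ml : List String) :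
    mainline_to_html_pgn ml
      = PySem.Str.join "" ((PySem.List.enumerate ml 0).flatMap (fun p => pvSep p.1 ++ [p.2])) := by
  have hfold : (fun (acc : List String) (p : Int × String) =>
      let acc := if (0 : Int) < p.1 ∧ (0 : Int) = p.1 % 2 then acc ++ ["<br/>"] else acc ++ [" "]
      acc ++ [p.2]) = fun acc p => acc ++ (pvSep p.1 ++ [p.2]) := by
    funext acc p
    simp only [pvSep]
    split_ifs <;> simp
  simp only [mainline_to_html_pgn, hfold, PySem.List.foldl_append_eq_flatMap, List.nil_append]

-- join with "<br/>" of a nonempty row list, pulled apart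
theorem pvJoinBr (row : String) (rows : List String) :
    (PySem.Str.join "<br/>" (row :: rows)).toList
      = row.toList ++ rows.flatMap (fun r => "<br/>".toList ++ r.toList) := by
  induction rows generalizing row with
  | nil =>
    rw [PySem.Str.toList_join]
    simp only [List.map_cons, List.map_nil, PySem.Chars.join_singleton, List.flatMap_nil,
      List.append_nil]
  | cons b rest ih =>
    have h := ih b
    rw [PySem.Str.toList_join] at h ⊢
    simp only [List.map_cons] at h ⊢
    rw [PySem.Chars.join_cons_cons, h, List.flatMap_cons]
    simp only [List.append_assoc]

-- everything A emits from an even index s ≥ 2 onward equals B's remaining rows, each preceded by "<br/>"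
theorem pvTail' (r : List String) (s : Int) (h2 : 2 ≤ s) (he : s % 2 = 0) :
    (((PySem.List.enumerate r s).flatMap (fun p => pvSep p.1 ++ [p.2])).map String.toList).flatten
      = (pvRowsL r).flatMap (fun row => "<br/>".toList ++ row.toList) := by
  match r with
  | [] => simp [PySem.List.enumerate_nil, pvRowsL]
  | [z] =>
    have hs : pvSep s = ["<br/>"] := by
      rw [pvSep, if_pos (by omega : (0:Int) < s ∧ (0:Int) = s % 2)]
    rw [pvRowsL]; rw [pvRowsL]
    simp [PySem.List.enumerate_cons, PySem.List.enumerate_nil, hs,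
      PySem.List.slice_to ([z]) (by norm_num : (0:Int) ≤ 2),
      PySem.List.slice_from ([z]) (by norm_num : (0:Int) ≤ 2),
      PySem.Str.toList_join, PySem.Chars.join_singleton]
  | z :: w :: r' =>
    have ih := pvTail' r' (s + 2) (by omega) (by omega)
    have hs : pvSep s = ["<br/>"] := by
      rw [pvSep, if_pos (by omega : (0:Int) < s ∧ (0:Int) = s % 2)]
    have hs1 : pvSep (s + 1) = [" "] := by
      rw [pvSep, if_neg (by omega : ¬((0:Int) < s + 1 ∧ (0:Int) = (s + 1) % 2))]
    rw [pvRowsL]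
    simp only [PySem.List.enumerate_cons, List.flatMap_cons, hs, hs1]
    rw [PySem.List.slice_to (z :: w :: r') (by norm_num : (0:Int) ≤ 2),
      PySem.List.slice_from (z :: w :: r') (by norm_num : (0:Int) ≤ 2)]
    simp only [show ((2:Int)).toNat = 2 from rfl, List.take, List.drop]
    have hrow : PySem.Chars.join [' '] [z.toList, w.toList] = z.toList ++ [' '] ++ w.toList := by
      rw [PySem.Chars.join_cons_cons, PySem.Chars.join_singleton]
    rw [show s + 1 + 1 = s + 2 by ring]
    simp [ih, PySem.Str.toList_join, hrow]
termination_by r.length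
decreasing_by simp

theorem mainline_to_html_pgn_spec : Claim_equal_mainline_to_html_pgn := by
  unfold Claim_equal_mainline_to_html_pgn
  intro ml _
  unfold Spec_mainline_to_html_pgn
  rw [← String.toList_inj]
  rw [pvA_eq]
  match ml with
  | [] => simp [PySem.List.enumerate_nil, mainline_to_html_pgn_alt, PySem.Str.toList_join,
      PySem.Chars.join_nil]
  | [x] =>
    have hnil : pvRowsL ([] : List String) = [] := by rw [pvRowsL]; simp
    simp only [mainline_to_html_pgn_alt]
    rw [if_neg (List.cons_ne_nil x [])]
    rw [show pvRows [x] 0 = pvRowsL [x] from by simpa using pvRows_eq [x] 0]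
    rw [pvRowsL]
    simp [hnil, PySem.List.enumerate_cons, PySem.List.enumerate_nil, pvSep,
      PySem.List.slice_to ([x]) (by norm_num : (0:Int) ≤ 2),
      PySem.List.slice_from ([x]) (by norm_num : (0:Int) ≤ 2),
      PySem.Str.toList_join, PySem.Chars.join_singleton, pvJoinEmpty, String.toList_append]
  | x :: y :: r =>
    simp only [mainline_to_html_pgn_alt]
    rw [if_neg (List.cons_ne_nil x (y :: r))]
    rw [show pvRows (x :: y :: r) 0 = pvRowsL (x :: y :: r) from by
      simpa using pvRows_eq (x :: y :: r) 0]
    rw [pvRowsL]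
    rw [if_neg (List.cons_ne_nil x (y :: r))]
    rw [PySem.List.slice_to (x :: y :: r) (by norm_num : (0:Int) ≤ 2),
      PySem.List.slice_from (x :: y :: r) (by norm_num : (0:Int) ≤ 2)]
    simp only [show ((2:Int)).toNat = 2 from rfl, List.take, List.drop]
    rw [String.toList_append, pvJoinBr]
    have h0 : pvSep 0 = [" "] := by simp [pvSep]
    have h1 : pvSep 1 = [" "] := by simp [pvSep]
    have htail := pvTail' r 2 (by norm_num) (by norm_num)
    have hrow : PySem.Chars.join [' '] [x.toList, y.toList] = x.toList ++ [' '] ++ y.toList := by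
      rw [PySem.Chars.join_cons_cons, PySem.Chars.join_singleton]
    simp only [PySem.List.enumerate_cons, List.flatMap_cons, h0, h1,
      show (0:Int) + 1 = 1 from rfl, show (1:Int) + 1 = 2 from rfl]
    rw [PySem.Str.toList_join, show "".toList = ([] : List Char) from rfl, pvJoinEmpty]
    simp only [List.map_append, List.map_cons, List.map_nil, List.flatten_append,
      List.flatten_cons, List.flatten_nil]
    rw [htail]
    simp [hrow]
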